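-- pv_equiv track=rewrite | github.com/o6-automation/o6-python-doc | main/gen_api_reference.py | build_index_md
-- ===== SOURCE A (Python) =====
-- def is_allowed(name: str) -> bool:
--     return (
--         name == "o6"
--         or name.startswith("o6.")
--         or name == "o6._o6"
--         or name.startswith("o6._o6.")
--     )
--
-- def ensure_md(path: str) -> str:
--     return path if path.endswith(".md") else path + ".md"
--
-- def md_link(title: str, path: str) -> str:
--     path = ensure_md(path)
--     return f"- [{title}]({path})"
--
-- def build_index_md(pages: dict[str, str]) -> str:
--
--     public = {}
--     internal = {}
--
--     for name, path in pages.items():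
--         path = ensure_md(path)
--
--         if not is_allowed(name):
--             continue
--
--         if name.startswith("o6._o6"):
--             internal[name] = path
--         else:
--             public[name] = path
--
--     lines = ["# API Reference", ""]
--
--     # PUBLIC
--     lines.append("## Public API")
--     lines.append("")
--
--     for name, path in sorted(public.items(), key=lambda x: x[0].split(".")[-1].lower()):
--         short = name.split(".")[-1]
--         lines.append(md_link(short, path))
--
--     lines.append("")
--
--     # INTERNAL
--     lines.append("## Low-Level API")
--     lines.append("")
--
--     for name, path in sorted(internal.items(), key=lambda x: x[0].split(".")[-1].lower()):
--         short = name.split(".")[-1]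
--         lines.append(md_link(short, path))
--
--     return "\n".join(lines)
-- ===== SOURCE B (Python) =====
-- def is_allowed(name: str) -> bool:
--     return (
--         name == "o6"
--         or name.startswith("o6.")
--         or name == "o6._o6"
--         or name.startswith("o6._o6.")
--     )
--
-- def ensure_md(path: str) -> str:
--     return path if path.endswith(".md") else path + ".md"
--
-- def md_link(title: str, path: str) -> str:
--     path = ensure_md(path)
--     return f"- [{title}]({path})"
--
-- def build_index_md(pages: dict[str, str]) -> str:
--     # Single pass with online insertion: each allowed entry's markdown line is
--     # formatted immediately and inserted at its sorted position (stable: after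
--     # all keys <=) into its bucket, so no sort call and no intermediate dicts.
--     pub: list[tuple[str, str]] = []
--     low: list[tuple[str, str]] = []
--     for name, path in pages.items():
--         if not is_allowed(name):
--             continue
--         short = name.split(".")[-1]
--         line = md_link(short, path)
--         key = short.lower()
--         bucket = low if name.startswith("o6._o6") else pub
--         i = 0
--         while i < len(bucket) and bucket[i][0] <= key:
--             i += 1
--         bucket.insert(i, (key, line))
--     return "\n".join(
--         ["# API Reference", "", "## Public API", ""]
--         + [line for _, line in pub]
--         + ["", "## Low-Level API", ""]
--         + [line for _, line in low]
--     )
-- ===== Notes on version B (the rewrite author's own statement) =====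
-- stated objective: alternative
-- what changed: B replaces A's classify-into-two-dicts-then-call-sorted-then-format pipeline with a single online pass: each allowed page is formatted into its markdown line immediately and inserted at its sorted position (stable insertion after all keys <=) into the right bucket list, so there is no sort call, no dicts and no post-pass formatting loop.
import Mathlib
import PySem

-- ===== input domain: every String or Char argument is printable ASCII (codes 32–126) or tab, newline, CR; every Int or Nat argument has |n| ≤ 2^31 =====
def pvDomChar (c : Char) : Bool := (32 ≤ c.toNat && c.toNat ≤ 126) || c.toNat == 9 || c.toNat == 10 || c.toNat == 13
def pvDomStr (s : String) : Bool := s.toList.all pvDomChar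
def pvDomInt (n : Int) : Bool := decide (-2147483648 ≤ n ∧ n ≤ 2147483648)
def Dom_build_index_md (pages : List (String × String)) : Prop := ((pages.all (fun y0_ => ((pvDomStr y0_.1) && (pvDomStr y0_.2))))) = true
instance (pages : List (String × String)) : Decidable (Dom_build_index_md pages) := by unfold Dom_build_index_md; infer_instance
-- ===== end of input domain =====

-- B replaces A's classify-then-sort-then-format pipeline by a single online pass that
-- formats each allowed entry at once and inserts it at its sorted position in its bucket.

-- ===== PORT A =====
-- shared same-module helpers (both Python sources define them identically)
def is_allowed (name : String) : Bool :=
  name == "o6" || PySem.Str.startswith name "o6." ||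
  name == "o6._o6" || PySem.Str.startswith name "o6._o6."

def ensure_md (path : String) : String :=
  if PySem.Str.endswith path ".md" then path else path ++ ".md"

def md_link (title : String) (path : String) : String :=
  "- [" ++ title ++ "](" ++ ensure_md path ++ ")"

-- name.split(".")[-1]: split with a nonempty separator always returns some nonempty list,
-- so the two defaults below are never used (exact)
def pvLastComp (s : String) : String := ((PySem.Str.split? s ".").getD []).getLastD ""

-- the sort key lambda x: x[0].split(".")[-1].lower()
def pvKey (x : String × String) : String := PySem.Str.lower (pvLastComp x.1)

def pvIsInternal (x : String × String) : Bool := PySem.Str.startswith x.1 "o6._o6"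

-- the body of A's classification loop (public dict, internal dict)
def pvStepA (acc : PySem.Dict String String × PySem.Dict String String)
    (np : String × String) : PySem.Dict String String × PySem.Dict String String :=
  let path := ensure_md np.2
  if !is_allowed np.1 then acc
  else if pvIsInternal np then (acc.1, acc.2.insert np.1 path)
  else (acc.1.insert np.1 path, acc.2)

def build_index_md (pages : List (String × String)) : String :=
  let pi := pages.foldl pvStepA (PySem.Dict.empty, PySem.Dict.empty)
  let lines := ["# API Reference", ""] ++ ["## Public API"] ++ [""]
  let lines := (PySem.List.sorted pi.1.items pvKey).foldl
      (fun ls x => ls ++ [md_link (pvLastComp x.1) x.2]) lines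
  let lines := lines ++ [""] ++ ["## Low-Level API"] ++ [""]
  let lines := (PySem.List.sorted pi.2.items pvKey).foldl
      (fun ls x => ls ++ [md_link (pvLastComp x.1) x.2]) lines
  PySem.Str.join "\n" lines

-- ===== PORT B =====
-- B's while loop: walk past every stored key <= key, insert (key, line) there (stable)
def insLine (key line : String) : List (String × String) → List (String × String)
  | [] => [(key, line)]
  | y :: ys => if y.1 ≤ key then y :: insLine key line ys else (key, line) :: y :: ys

-- the body of B's single pass (pub bucket, low bucket)
def pvStepB (acc : List (String × String) × List (String × String))
    (np : String × String) : List (String × String) × List (String × String) :=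
  if !is_allowed np.1 then acc
  else
    let short := pvLastComp np.1
    let line := md_link short np.2
    let key := PySem.Str.lower short
    if pvIsInternal np then (acc.1, insLine key line acc.2)
    else (insLine key line acc.1, acc.2)

def build_index_md_alt (pages : List (String × String)) : String :=
  let pl := pages.foldl pvStepB ([], [])
  PySem.Str.join "\n"
    (["# API Reference", "", "## Public API", ""] ++ pl.1.map Prod.snd ++
      (["", "## Low-Level API", ""] ++ pl.2.map Prod.snd))

-- ===== PRECONDITION & SPEC =====
-- pages is a Python dict, so its keys are distinct; Pre_ states exactly that (the
-- association-list encoding otherwise admits duplicate keys no dict ever produces).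
def Pre_build_index_md (pages : List (String × String)) : Prop :=
  (pages.map Prod.fst).Nodup
instance (pages : List (String × String)) : Decidable (Pre_build_index_md pages) := by
  unfold Pre_build_index_md; infer_instance

def pvWitness_build_index_md : (List (String × String)) :=
  [("o6", "index"), ("o6.run", "run.md"), ("o6._o6.core", "core"), ("x", "y")]

def Spec_build_index_md (pages : List (String × String)) (out : String) : Prop := out = build_index_md_alt pages
instance (pages : List (String × String)) (out : String) : Decidable (Spec_build_index_md pages out) := by unfold Spec_build_index_md; infer_instance

-- ===== CLAIM (what is proved, stated in full; the proofs are below) =====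
def Claim_equal_build_index_md : Prop := ∀ (pages : List (String × String)), Dom_build_index_md pages → Pre_build_index_md pages → Spec_build_index_md pages (build_index_md pages)

-- ===== LEMMAS AND PROOFS =====

-- the comparator of sorted(..., key=pvKey) on originals, and on (key, line) pairs
def pvBfA (a b : String × String) : Bool := decide (pvKey a < pvKey b)
def pvBf (a b : String × String) : Bool := decide (a.1 < b.1)
-- the (key, line) pair an A-side dict item maps to
def pvG (x : String × String) : String × String := (pvKey x, md_link (pvLastComp x.1) x.2)

-- ensure_md is idempotent, so md_link on an already-ensured path changes nothing
lemma ensure_md_idem (p : String) : ensure_md (ensure_md p) = ensure_md p := by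
  by_cases h : PySem.Chars.endswith p.toList ['.', 'm', 'd'] = true
  · simp [ensure_md, h]
  · have h2 : PySem.Chars.endswith (p.toList ++ ['.', 'm', 'd']) ['.', 'm', 'd'] = true :=
      (PySem.Chars.endswith_iff _ _).mpr (List.suffix_append _ _)
    simp [ensure_md, h, h2]

lemma md_link_ensure (t p : String) : md_link t (ensure_md p) = md_link t p := by
  simp [md_link, ensure_md_idem]

-- a fresh key appends at the end of a dict
lemma insert_items_of_fresh (d : PySem.Dict String String) (k : String) (v : String)
    (h : k ∉ d.items.map Prod.fst) :
    (d.insert k v).items = d.items ++ [(k, v)] := by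
  have hc : d.contains k = false := by
    simp only [PySem.Dict.contains, List.any_eq_false]
    intro p hp
    simpa using fun he => h (by simpa [he] using List.mem_map_of_mem (f := Prod.fst) hp)
  simp [PySem.Dict.insert, hc]

-- A's classification loop builds exactly the two filterMaps, in page order
lemma foldA_items (pages : List (String × String)) (d e : PySem.Dict String String)
    (hnd : (pages.map Prod.fst).Nodup)
    (hfresh : ∀ q ∈ pages, q.1 ∉ d.items.map Prod.fst ∧ q.1 ∉ e.items.map Prod.fst) :
    (pages.foldl pvStepA (d, e)).1.items
      = d.items ++ pages.filterMap
          (fun np => if is_allowed np.1 && !pvIsInternal np then some (np.1, ensure_md np.2) else none)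
    ∧ (pages.foldl pvStepA (d, e)).2.items
      = e.items ++ pages.filterMap
          (fun np => if is_allowed np.1 && pvIsInternal np then some (np.1, ensure_md np.2) else none) := by
  induction pages generalizing d e with
  | nil => simp
  | cons q rest ih =>
    have hnd' : q.1 ∉ rest.map Prod.fst ∧ (rest.map Prod.fst).Nodup := by
      rw [List.map_cons, List.nodup_cons] at hnd; exact hnd
    have hndr := hnd'.2
    have hq1 := hnd'.1
    by_cases ha : is_allowed q.1
    · by_cases hi : pvIsInternal q
      · have he' := insert_items_of_fresh e q.1 (ensure_md q.2) (hfresh q (by simp)).2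
        have := ih d (e.insert q.1 (ensure_md q.2)) hndr (by
          intro r hr
          refine ⟨(hfresh r (by simp [hr])).1, ?_⟩
          rw [he']
          simp only [List.map_append, List.mem_append]
          rintro (h | h)
          · exact (hfresh r (by simp [hr])).2 h
          · simp only [List.map_cons, List.map_nil, List.mem_singleton] at h
            exact hq1 (h ▸ List.mem_map_of_mem (f := Prod.fst) hr))
        rw [he'] at this
        simpa [pvStepA, ha, hi, List.append_assoc] using this
      · have hd' := insert_items_of_fresh d q.1 (ensure_md q.2) (hfresh q (by simp)).1
        have := ih (d.insert q.1 (ensure_md q.2)) e hndr (by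
          intro r hr
          refine ⟨?_, (hfresh r (by simp [hr])).2⟩
          rw [hd']
          simp only [List.map_append, List.mem_append]
          rintro (h | h)
          · exact (hfresh r (by simp [hr])).1 h
          · simp only [List.map_cons, List.map_nil, List.mem_singleton] at h
            exact hq1 (h ▸ List.mem_map_of_mem (f := Prod.fst) hr))
        rw [hd'] at this
        simpa [pvStepA, ha, hi, List.append_assoc] using this
    · have := ih d e hndr (fun r hr => hfresh r (by simp [hr]))
      simpa [pvStepA, ha] using this

-- B's while-loop insertion IS stable sorted insertion by the stored key
lemma insLine_eq_insertBy (key line : String) (l : List (String × String)) :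
    insLine key line l = PySem.List.insertBy pvBf (key, line) l := by
  induction l with
  | nil => simp [insLine, PySem.List.insertBy]
  | cons y ys ih =>
    have hb : pvBf (key, line) y = decide (key < y.1) := rfl
    by_cases h : y.1 ≤ key
    · simp [insLine, PySem.List.insertBy, hb, h, not_lt.mpr h, ih]
    · simp [insLine, PySem.List.insertBy, hb, h, lt_of_not_ge h]

-- mapping an A-side item to its (key, line) pair commutes with sorted insertion
lemma map_pvG_insertBy (x : String × String) (l : List (String × String)) :
    (PySem.List.insertBy pvBfA x l).map pvG = PySem.List.insertBy pvBf (pvG x) (l.map pvG) := by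
  induction l with
  | nil => simp [PySem.List.insertBy]
  | cons y ys ih =>
    have hb : pvBf (pvG x) (pvG y) = pvBfA x y := rfl
    by_cases h : pvBfA x y = true
    · simp [PySem.List.insertBy, hb, h]
    · simp [PySem.List.insertBy, hb, h, ih]

-- hence it commutes with the whole insertion fold (= stable sort)
lemma map_pvG_sortfold (l : List (String × String)) (acc : List (String × String)) :
    (l.foldl (fun a x => PySem.List.insertBy pvBfA x a) acc).map pvG
      = (l.map pvG).foldl (fun a x => PySem.List.insertBy pvBf x a) (acc.map pvG) := by
  induction l generalizing acc with
  | nil => simp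
  | cons y ys ih => simpa [map_pvG_insertBy] using ih (PySem.List.insertBy pvBfA y acc)

-- B's single pass builds, per bucket, the insertion fold of the mapped filterMap
lemma foldB_buckets (pages : List (String × String))
    (P L : List (String × String)) :
    pages.foldl pvStepB (P, L)
      = ((pages.filterMap (fun np => if is_allowed np.1 && !pvIsInternal np
            then some (pvG (np.1, ensure_md np.2)) else none)).foldl
            (fun a x => PySem.List.insertBy pvBf x a) P,
         (pages.filterMap (fun np => if is_allowed np.1 && pvIsInternal np
            then some (pvG (np.1, ensure_md np.2)) else none)).foldl
            (fun a x => PySem.List.insertBy pvBf x a) L) := by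
  induction pages generalizing P L with
  | nil => simp
  | cons q rest ih =>
    have hg : pvG (q.1, ensure_md q.2)
        = (PySem.Str.lower (pvLastComp q.1), md_link (pvLastComp q.1) q.2) := by
      simp [pvG, pvKey, md_link_ensure]
    by_cases ha : is_allowed q.1
    · by_cases hi : pvIsInternal q
      · simpa [pvStepB, ha, hi, hg, insLine_eq_insertBy] using
          ih P (PySem.List.insertBy pvBf (pvG (q.1, ensure_md q.2)) L)
      · simpa [pvStepB, ha, hi, hg, insLine_eq_insertBy] using
          ih (PySem.List.insertBy pvBf (pvG (q.1, ensure_md q.2)) P) L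
    · simpa [pvStepB, ha] using ih P L

-- ===== VERDICT (by name: the statement is the Claim_ definition above) =====
theorem build_index_md_spec : Claim_equal_build_index_md := by
  intro pages _ hpre
  have hempty : (PySem.Dict.empty : PySem.Dict String String).items = [] := rfl
  have hfold := foldA_items pages PySem.Dict.empty PySem.Dict.empty hpre
    (fun q _ => by rw [hempty]; simp)
  rw [hempty, List.nil_append, List.nil_append] at hfold
  show build_index_md pages = build_index_md_alt pages
  simp only [build_index_md, build_index_md_alt]
  rw [hfold.1, hfold.2, foldB_buckets,
    PySem.List.foldl_append_singleton_eq_map, PySem.List.foldl_append_singleton_eq_map]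
  have hmap : ∀ (l : List (String × String)),
      l.map (fun x => md_link (pvLastComp x.1) x.2) = (l.map pvG).map Prod.snd := by
    intro l; rw [List.map_map]; rfl
  rw [hmap, hmap, PySem.List.sorted_eq_foldl_insertBy, PySem.List.sorted_eq_foldl_insertBy]
  have hbfa : (fun (a : List (String × String)) x => PySem.List.insertBy
      (fun a b => decide (pvKey a < pvKey b)) x a)
        = fun a x => PySem.List.insertBy pvBfA x a := rfl
  rw [hbfa, map_pvG_sortfold, map_pvG_sortfold]
  simp [List.map_filterMap, apply_ite (Option.map pvG), List.append_assoc]
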